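-- pv_equiv track=rewrite | github.com/pypi-data/pypi-mirror-257 | packages/pchjlib/pchjlib-0.0.3.2-py3-none-any.whl/pchjlib.py | an_ki_tu
-- ===== SOURCE A (Python) =====
-- def an_ki_tu(s):
--     danh_sach = [i for i in s]
--     if len(danh_sach) == 0:
--         return "•"
--     if len(danh_sach) > 0:
--         if "/" not in danh_sach:
--             return "".join("•" for i in range(len(s)))
--         else:
--             an = ["•" for _ in ("".join([i for i in danh_sach if i != "/"]))]
--             vt = [i for i in range(len(s)) if danh_sach[i] == "/"]
--             for i in range(len(vt)):
--                 an.insert(vt[i], "/")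
--             return "".join(an)
-- ===== SOURCE B (Python) =====
-- def an_ki_tu(s):
--     return "/".join("•" * len(part) for part in s.split("/"))
-- ===== Notes on version B (the rewrite author's own statement) =====
-- stated objective: faster
-- what changed: B splits the string on the slash delimiter and rejoins bullet runs in one pass, instead of A's counting the other characters, collecting delimiter indices and re-inserting each delimiter one by one into a bullet list.
-- intended difference: On the empty string A returns a single bullet (an accident of its special-case guard) while B returns the empty string, the length-preserving mask a maintainer would expect. — e.g. on an_ki_tu(""): A returns "•", B returns ""
import Mathlib
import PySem

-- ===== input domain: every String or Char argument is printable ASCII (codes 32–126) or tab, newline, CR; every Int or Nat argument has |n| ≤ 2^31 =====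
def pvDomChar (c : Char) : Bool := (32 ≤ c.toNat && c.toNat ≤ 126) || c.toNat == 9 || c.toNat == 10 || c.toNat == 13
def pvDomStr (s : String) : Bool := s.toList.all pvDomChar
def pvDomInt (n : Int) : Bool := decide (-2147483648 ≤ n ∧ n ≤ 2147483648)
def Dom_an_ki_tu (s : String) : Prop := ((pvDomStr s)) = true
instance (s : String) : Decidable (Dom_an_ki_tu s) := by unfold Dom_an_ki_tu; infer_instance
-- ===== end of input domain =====

-- B masks by splitting on the slash delimiter and joining bullet runs (one split/join, measured
-- faster) instead of A's count-filter-and-reinsert construction; equal except the empty string (see D_).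


-- ===== PORT A =====
def an_ki_tu (s : String) : String :=
  let danh_sach := s.toList
  if danh_sach.length = 0 then "•"
  else if danh_sach.length > 0 then
    if ¬ ('/' ∈ danh_sach) then
      PySem.Str.join "" ((PySem.List.pyRange 0 (PySem.Str.len s) 1).map (fun _ => ("•" : String)))
    else
      -- an / vt / an2 of the Python, inlined
      PySem.Str.join ""
        ((PySem.List.pyRange 0 (((((PySem.List.pyRange 0 (PySem.Str.len s) 1).filter
              (fun i => PySem.List.pyGetD danh_sach i ' ' == '/')).length : Nat) : Int)) 1).foldl
          (fun acc i => PySem.List.insert acc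
            (PySem.List.pyGetD ((PySem.List.pyRange 0 (PySem.Str.len s) 1).filter
              (fun i => PySem.List.pyGetD danh_sach i ' ' == '/')) i 0) ("/" : String))
          (((PySem.Str.join "" ((danh_sach.filter (fun c => c != '/')).map
              (fun c => String.ofList [c]))).toList).map (fun _ => ("•" : String))))
  else "" -- unreachable (len = 0 handled above); Python would fall through

-- ===== PORT B =====
def an_ki_tu_alt (s : String) : String :=
  PySem.Str.join "/" ((PySem.Chars.splitOn s.toList ['/']).map
    (fun p => String.ofList (List.replicate p.length '•')))

-- ===== PRECONDITION & SPEC =====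
-- On the empty string A returns a single bullet (an accident of its special-case guard) while B
-- returns the empty string, the length-preserving mask a maintainer would expect.
def D_an_ki_tu (s : String) : Prop := s = ""
instance (s : String) : Decidable (D_an_ki_tu s) := by unfold D_an_ki_tu; infer_instance
def Spec_an_ki_tu (s : String) (out : String) : Prop := ¬ D_an_ki_tu s → out = an_ki_tu_alt s
instance (s : String) (out : String) : Decidable (Spec_an_ki_tu s out) := by unfold Spec_an_ki_tu; infer_instance
def pvDiffWitness_an_ki_tu : String := ""
def pvDiffWitnessOut_an_ki_tu : String × String := ("•", "")

-- ===== CLAIM (what is proved, stated in full; the proofs are below) =====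
def Claim_unchanged_an_ki_tu : Prop := ∀ (s : String), Dom_an_ki_tu s → Spec_an_ki_tu s (an_ki_tu s)
def Claim_changed_an_ki_tu : Prop := Dom_an_ki_tu (pvDiffWitness_an_ki_tu) ∧ D_an_ki_tu (pvDiffWitness_an_ki_tu) ∧ an_ki_tu (pvDiffWitness_an_ki_tu) = pvDiffWitnessOut_an_ki_tu.1 ∧ an_ki_tu_alt (pvDiffWitness_an_ki_tu) = pvDiffWitnessOut_an_ki_tu.2 ∧ pvDiffWitnessOut_an_ki_tu.1 ≠ pvDiffWitnessOut_an_ki_tu.2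
def Claim_exact_an_ki_tu : Prop := ∀ (s : String), Dom_an_ki_tu s → D_an_ki_tu s → an_ki_tu s ≠ an_ki_tu_alt s

-- ===== LEMMAS AND PROOFS =====

-- the per-character mask both programs compute (proof-side characterisation)
def maskChars (l : List Char) : List Char := l.map (fun c => if c = '/' then '/' else '•')

-- ---- B side: splitOn [c] is List.splitOnP, and joining bullet runs is the mask ----

theorem go_splitOn (c : Char) : ∀ (fuel : Nat) (l cur : List Char) (acc : List (List Char)),
    l.length < fuel →
    PySem.Chars.splitOn.go [c] fuel l cur acc
      = acc.reverse ++ (l.splitOnP (· == c)).modifyHead (cur.reverse ++ ·) := by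
  intro fuel
  induction fuel with
  | zero => intro l cur acc h; omega
  | succ fuel ih =>
    intro l cur acc h
    cases l with
    | nil =>
      simp [PySem.Chars.splitOn.go, List.splitOnP_nil]
    | cons x rest =>
      rw [PySem.Chars.splitOn.go]
      by_cases hx : x = c
      · subst hx
        have hpre : [x].isPrefixOf (x :: rest) = true := by simp [List.isPrefixOf]
        simp only [hpre, if_true, List.length_cons, List.drop_succ_cons, List.length_nil,
          List.drop_zero]
        rw [ih rest [] (cur.reverse :: acc) (by simpa using Nat.lt_of_succ_lt_succ h)]
        rw [List.splitOnP_cons]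
        simp only [beq_self_eq_true, if_true, List.modifyHead_cons]
        cases hps : rest.splitOnP (· == x) with
        | nil => exact absurd hps (List.splitOnP_ne_nil _ _)
        | cons p ps => simp
      · have hpre : [c].isPrefixOf (x :: rest) = false := by
          simp [List.isPrefixOf]; exact fun h' => absurd h'.symm hx
        simp only [hpre, Bool.false_eq_true, if_false]
        rw [ih rest (x :: cur) acc (by simpa using Nat.lt_of_succ_lt_succ h)]
        rw [List.splitOnP_cons]
        have : (x == c) = false := by simpa using hx
        simp only [this, Bool.false_eq_true, if_false]
        cases hps : rest.splitOnP (· == c) with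
        | nil => exact absurd hps (List.splitOnP_ne_nil _ _)
        | cons p ps => simp

theorem splitOn_single (c : Char) (l : List Char) :
    PySem.Chars.splitOn l [c] = l.splitOnP (· == c) := by
  rw [PySem.Chars.splitOn, go_splitOn c (l.length + 1) l [] [] (Nat.lt_succ_self _)]
  cases hps : l.splitOnP (· == c) with
  | nil => exact absurd hps (List.splitOnP_ne_nil _ _)
  | cons p ps => simp

theorem join_cons_head (sep : List Char) (a : Char) (p : List Char) (parts : List (List Char)) :
    PySem.Chars.join sep ((a :: p) :: parts) = a :: PySem.Chars.join sep (p :: parts) := by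
  cases parts with
  | nil => simp [PySem.Chars.join_singleton]
  | cons q qs => rw [PySem.Chars.join_cons_cons, PySem.Chars.join_cons_cons]; simp

theorem alt_mask (l : List Char) :
    PySem.Chars.join ['/'] ((PySem.Chars.splitOn l ['/']).map
      (fun p => List.replicate p.length '•')) = maskChars l := by
  rw [splitOn_single]
  induction l with
  | nil => simp [List.splitOnP_nil, PySem.Chars.join_singleton, maskChars]
  | cons x rest ih =>
    rw [List.splitOnP_cons]
    cases hps : rest.splitOnP (· == '/') with
    | nil => exact absurd hps (List.splitOnP_ne_nil _ _)
    | cons p ps =>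
      rw [hps] at ih
      by_cases hx : x = '/'
      · subst hx
        simp only [beq_self_eq_true, if_true, List.map_cons, List.length_nil,
          List.replicate_zero, PySem.Chars.join_cons_cons, List.nil_append]
        simp only [List.map_cons] at ih
        simp [maskChars] at ih ⊢
        exact ih
      · have hb : (x == '/') = false := by simpa using hx
        simp only [hb, Bool.false_eq_true, if_false, List.modifyHead_cons, List.map_cons,
          List.length_cons, List.replicate_succ, join_cons_head]
        simp only [List.map_cons] at ih
        rw [ih]
        simp [maskChars, hx]

-- ---- A side: the insert loop rebuilds the mask ----

theorem insert_cons_succ {α : Type} (x : α) (xs : List α) (p : Nat) (v : α) :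
    PySem.List.insert (x :: xs) (((p + 1 : Nat) : Int)) v
      = x :: PySem.List.insert xs ((p : Nat) : Int) v := by
  simp only [PySem.List.insert, PySem.List.sliceIndices]
  norm_num
  rw [if_neg (by omega : ¬((p : Int) + 1 < 0)), if_neg (by omega : ¬((p : Int) < 0))]
  have h1 : (min (p : Int) (xs.length : Int) + 1).toNat
      = (min (p : Int) (xs.length : Int)).toNat + 1 := by omega
  rw [h1, List.take_succ_cons, List.drop_succ_cons, List.cons_append]

theorem foldl_insert_map_succ {α : Type} (v : α) (ps : List Nat) : ∀ (x : α) (xs : List α),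
    (ps.map Nat.succ).foldl (fun acc p => PySem.List.insert acc ((p : Nat) : Int) v) (x :: xs)
      = x :: ps.foldl (fun acc p => PySem.List.insert acc ((p : Nat) : Int) v) xs := by
  induction ps with
  | nil => intro x xs; simp
  | cons q qs ih =>
    intro x xs
    simp only [List.map_cons, List.foldl_cons]
    rw [show (Nat.succ q) = q + 1 from rfl, insert_cons_succ, ih]

def natSlash (l : List Char) : List Nat :=
  (List.range l.length).filter (fun i => l.getD i ' ' == '/')

theorem natSlash_cons (x : Char) (l : List Char) :
    natSlash (x :: l) = (if x = '/' then [0] else []) ++ (natSlash l).map Nat.succ := by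
  unfold natSlash
  rw [List.length_cons, List.range_succ_eq_map, List.filter_cons, List.filter_map]
  have hcomp : ((fun i => (x :: l).getD i ' ' == '/') ∘ Nat.succ)
      = (fun i => l.getD i ' ' == '/') := by funext i; simp
  rw [hcomp]
  by_cases hx : x = '/' <;> simp [hx]

theorem a_mask (l : List Char) :
    (natSlash l).foldl (fun acc p => PySem.List.insert acc ((p : Nat) : Int) ("/" : String))
        (List.replicate ((l.filter (fun c => c != '/')).length) ("•" : String))
      = l.map (fun c => if c = '/' then ("/" : String) else "•") := by
  induction l with
  | nil => simp [natSlash]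
  | cons x rest ih =>
    rw [natSlash_cons]
    by_cases hx : x = '/'
    · subst hx
      simp only [if_true, List.filter_cons, bne_self_eq_false, Bool.false_eq_true, if_false,
        List.singleton_append, List.foldl_cons, Nat.cast_zero, PySem.List.insert_zero]
      rw [foldl_insert_map_succ, ih]
      simp
    · have hb : (x != '/') = true := by simpa using hx
      simp only [hx, if_false, List.filter_cons, hb, if_true, List.nil_append, List.length_cons,
        List.replicate_succ]
      rw [foldl_insert_map_succ, ih]
      simp [hx]

-- joining "" over singleton-producing maps is the underlying char map
theorem join_nil_map (g : Char → Char) (l : List Char) :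
    PySem.Chars.join [] (l.map (fun c => [g c])) = l.map g := by
  have h := PySem.Chars.join_nil_singletons (l.map g)
  rwa [List.map_map] at h

-- ---- the two ports agree with the mask ----

theorem alt_toList (s : String) : (an_ki_tu_alt s).toList = maskChars s.toList := by
  unfold an_ki_tu_alt
  rw [PySem.Str.toList_join, List.map_map]
  have h1 : (String.toList ∘ fun p => String.ofList (List.replicate p.length '•'))
      = (fun p : List Char => List.replicate p.length '•') := by
    funext p; simp
  have h2 : ("/" : String).toList = ['/'] := rfl
  rw [h1, h2, alt_mask]

set_option maxHeartbeats 1000000 in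
theorem a_toList (s : String) (hl : s.toList ≠ []) :
    (an_ki_tu s).toList = maskChars s.toList := by
  unfold an_ki_tu
  rw [if_neg (by simpa using hl), if_pos (by simpa using List.length_pos_iff.mpr hl)]
  by_cases hmem : '/' ∈ s.toList
  · rw [if_neg (by simpa using hmem)]
    -- the insert-reconstruction branch
    have hnil : ("" : String).toList = [] := rfl
    have han : ((PySem.Str.join "" ((s.toList.filter (fun c => c != '/')).map
          (fun c => String.ofList [c]))).toList).map (fun _ => ("•" : String))
        = List.replicate ((s.toList.filter (fun c => c != '/')).length) ("•" : String) := by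
      rw [PySem.Str.toList_join, hnil, List.map_map]
      have : (String.toList ∘ fun c => String.ofList [c]) = (fun c : Char => [c]) := by
        funext c; simp
      rw [this]
      have h := join_nil_map id (s.toList.filter (fun c => c != '/'))
      simp only [List.map_id] at h
      rw [show (fun c : Char => [c]) = (fun c : Char => [id c]) from rfl, h, List.map_const']
    have hvt : (PySem.List.pyRange 0 (PySem.Str.len s) 1).filter
          (fun i => PySem.List.pyGetD s.toList i ' ' == '/')
        = (natSlash s.toList).map (fun k : Nat => (k : Int)) := by
      rw [PySem.Str.len_eq, PySem.List.pyRange_zero_natCast, List.filter_map]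
      congr 1
      unfold natSlash
      congr 1
      funext i
      simp [PySem.List.pyGetD_natCast]
    rw [han, hvt]
    rw [PySem.List.foldl_pyRange_zero_pyGetD' ((natSlash s.toList).map (fun k : Nat => (k : Int))) 0
      (fun acc x => PySem.List.insert acc x ("/" : String))]
    rw [List.foldl_map, a_mask]
    rw [PySem.Str.toList_join, hnil, List.map_map]
    have : (String.toList ∘ fun c => if c = '/' then ("/" : String) else "•")
        = (fun c : Char => [if c = '/' then '/' else '•']) := by
      funext c; by_cases hc : c = '/' <;> simp [hc]
    rw [this, join_nil_map (fun c => if c = '/' then '/' else '•')]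
    rfl
  · rw [if_pos (by simpa using hmem)]
    -- the bullets-only branch
    rw [PySem.Str.toList_join, PySem.Str.len_eq, PySem.List.pyRange_zero_natCast,
      List.map_map, List.map_map]
    have h1 : ((String.toList ∘ fun _ => ("•" : String)) ∘ fun k : Nat => (k : Int))
        = (fun _ : Nat => ['•']) := by
      funext k
      show ("•" : String).toList = ['•']
      decide
    rw [h1]
    have h2 : (List.range s.toList.length).map (fun _ : Nat => (['•'] : List Char))
        = (List.replicate s.toList.length '•').map (fun c => [c]) := by
      simp [List.map_const', List.map_replicate]
    have hnil : ("" : String).toList = [] := rfl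
    rw [hnil, h2, PySem.Chars.join_nil_singletons]
    unfold maskChars
    rw [show (List.replicate s.toList.length '•')
        = s.toList.map (fun _ => '•') from (List.map_const' ).symm]
    apply List.map_congr_left
    intro c hc
    rw [if_neg]
    intro hcc
    exact hmem (hcc ▸ hc)

theorem an_ki_tu_spec : Claim_unchanged_an_ki_tu := by
  intro s _ hne
  have hl : s.toList ≠ [] := fun h => hne (String.toList_eq_nil_iff.mp h)
  exact String.toList_inj.mp ((a_toList s hl).trans (alt_toList s).symm)

-- ===== VERDICT (by name: the statement is the Claim_ definition above) =====
theorem an_ki_tu_changed : Claim_changed_an_ki_tu := by unfold Claim_changed_an_ki_tu; decide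

theorem an_ki_tu_tight : Claim_exact_an_ki_tu := by
  intro s _ hD
  unfold D_an_ki_tu at hD
  subst hD
  decide
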